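-- pv_equiv track=rewrite | github.com/akashpapnai/My-codes | Others/Graphs/is_graph_wheel.py | isWheel
-- ===== SOURCE A (Python) =====
-- def isWheel(adj):
--     if len(adj)==4:
--         return True if adj == [[0,1,1,1],[1,0,1,1],[1,1,0,1],[1,1,1,0]] else False
--
--     for i in range(len(adj)):    # Handle diagonals
--         if adj[i][i]!=False:
--             return False
--
--     i = 0
--     flag,index = 0,-1
--     while i<len(adj):            # Determine middle node
--         number = [0,0]
--         j=0
--         while j<len(adj[0]):
--             if adj[i][j]==False:
--                 number[0]+=1
--             else:
--                 number[1]+=1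
--             j+=1
--         if number[0]==1 and number[1]==len(adj[0])-1:
--             flag+= 1
--             index = i
--         i+=1
--     if flag>1 or flag ==0:
--         return False
--     for i in range(len(adj)):           # Determine corner nodes
--         if i == index:
--             continue
--         number= [0,0]
--         for j in range(len(adj)):
--             if adj[i][j]==False:
--                 number[0]+=1
--             else:
--                 number[1]+=1
--         if number[1]!=3:
--             return False
--     return  True
-- ===== SOURCE B (Python) =====
-- WHEEL4 = [[0, 1, 1, 1], [1, 0, 1, 1], [1, 1, 0, 1], [1, 1, 1, 0]]
--
-- def isWheel(adj):
--     n = len(adj)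
--     if n == 4:
--         return adj == WHEEL4
--     for i in range(n):
--         if adj[i][i] != False:
--             return False
--     degs = sorted(len(row) - row.count(False) for row in adj)
--     return degs == [3] * (n - 1) + [n - 1]
-- ===== Notes on version B (the rewrite author's own statement) =====
-- stated objective: alternative
-- what changed: Replaces A's flag/index hub-search loop plus separate corner re-scan with a single multiset test: sort the per-row degree list (computed as len(row) - row.count(False)) and compare it to the wheel profile [3]*(n-1)+[n-1].
-- outside the precondition, e.g. on isWheel([[0, 1, 1], [1, 0, 0]]): A returns False, B returns False
import Mathlib
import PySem

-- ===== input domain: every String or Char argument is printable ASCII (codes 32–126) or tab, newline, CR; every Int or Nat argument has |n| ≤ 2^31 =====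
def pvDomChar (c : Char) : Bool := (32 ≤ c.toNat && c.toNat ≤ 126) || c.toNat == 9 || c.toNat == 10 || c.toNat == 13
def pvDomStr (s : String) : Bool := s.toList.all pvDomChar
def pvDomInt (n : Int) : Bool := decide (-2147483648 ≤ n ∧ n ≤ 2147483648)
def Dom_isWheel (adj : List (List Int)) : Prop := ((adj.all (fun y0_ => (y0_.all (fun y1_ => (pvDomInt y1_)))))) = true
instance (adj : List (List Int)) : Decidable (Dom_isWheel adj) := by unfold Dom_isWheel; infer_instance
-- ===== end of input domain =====

-- B replaces A's hub-search (flag/index while-loop) and separate corner re-scan with a single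
-- multiset test: sort the degree list and compare it to the wheel profile [3,...,3,n-1]
-- (objective: simpler); neither version mutates its argument.

-- ===== PORT A =====
-- adj[i]: exact when i is in range (Python raises IndexError out of range; those inputs are outside Pre_isWheel)
def pvRowA (adj : List (List Int)) (i : Nat) : List Int :=
  (PySem.List.pyGet? adj (i : Int)).getD []

-- the inner while loop of A: number = [zeros, nonzeros] over columns 0..m-1
-- (row[j]: exact when j < row.length — Python raises IndexError otherwise, outside Pre_isWheel)
def pvCountA (row : List Int) (m : Nat) : Nat × Nat :=
  (List.range m).foldl
    (fun (nm : Nat × Nat) (j : Nat) =>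
      if (PySem.List.pyGet? row (j : Int)).getD 1 = 0 then (nm.1 + 1, nm.2) else (nm.1, nm.2 + 1))
    (0, 0)

def isWheel (adj : List (List Int)) : Bool :=
  if adj.length = 4 then decide (adj = [[0,1,1,1],[1,0,1,1],[1,1,0,1],[1,1,1,0]])
  else if (List.range adj.length).any (fun i => (PySem.List.pyGet? (pvRowA adj i) (i : Int)).getD 1 ≠ 0) then false
  else
    -- len(adj[0]) is only read by Python when the loop body runs (adj ≠ []); headD [] is exact then
    let m := (adj.headD []).length
    let fi := (List.range adj.length).foldl
      (fun (fi : Nat × Int) i =>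
        let nm := pvCountA (pvRowA adj i) m
        if nm.1 = 1 ∧ (nm.2 : Int) = (m : Int) - 1 then (fi.1 + 1, (i : Int)) else fi)
      (0, -1)
    if fi.1 > 1 ∨ fi.1 = 0 then false
    else (List.range adj.length).all
      (fun i => if (i : Int) = fi.2 then true
                else decide ((pvCountA (pvRowA adj i) adj.length).2 = 3))

-- ===== PORT B =====
-- module constant WHEEL4 of Source B
def pvWheel4 : List (List Int) := [[0,1,1,1],[1,0,1,1],[1,1,0,1],[1,1,1,0]]

-- Source B: degs = sorted(len(row) - row.count(False) for row in adj); degs == [3]*(n-1) + [n-1]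
def isWheel_alt (adj : List (List Int)) : Bool :=
  let n := adj.length
  if n = 4 then decide (adj = pvWheel4)
  else if (List.range n).any (fun i =>
      (PySem.List.pyGet? ((PySem.List.pyGet? adj (i : Int)).getD []) (i : Int)).getD 1 ≠ 0) then false
  else
    let degs := PySem.List.sorted
      (adj.map (fun row => (row.length : Int) - (PySem.List.count row (0 : Int) : Int)))
      (fun x => x) false
    decide (degs = List.replicate (n - 1) (3 : Int) ++ [(n : Int) - 1])

-- ===== PRECONDITION & SPEC =====
-- Pre_ admits the len==4 fast path, square matrices, and any matrix whose diagonal scan hits a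
-- nonzero entry before any too-short row (both programs return False there in the same way);
-- it excludes the remaining non-square matrices: on them A may raise IndexError, and when A does
-- return, its value mixes len(adj[0]) with len(adj) and is an accident of its implementation.
def Pre_isWheel (adj : List (List Int)) : Prop :=
  adj.length = 4 ∨ (∀ row ∈ adj, row.length = adj.length) ∨
  (∃ k < adj.length, k < (adj.getD k []).length ∧ (adj.getD k []).getD k 0 ≠ 0 ∧
    ∀ j < k, j < (adj.getD j []).length ∧ (adj.getD j []).getD j 0 = 0)
instance (adj : List (List Int)) : Decidable (Pre_isWheel adj) := by unfold Pre_isWheel; infer_instance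

def pvWitness_isWheel : List (List Int) :=
  [[0,1,1,1,1],[1,0,1,0,1],[1,1,0,1,0],[1,0,1,0,1],[1,1,0,1,0]]

def Spec_isWheel (adj : List (List Int)) (out : Bool) : Prop := out = isWheel_alt adj
instance (adj : List (List Int)) (out : Bool) : Decidable (Spec_isWheel adj out) := by unfold Spec_isWheel; infer_instance

-- ===== CLAIM (what is proved, stated in full; the proofs are below) =====
def Claim_equal_isWheel : Prop := ∀ (adj : List (List Int)), Dom_isWheel adj → Pre_isWheel adj → Spec_isWheel adj (isWheel adj)

-- ===== LEMMAS AND PROOFS =====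

-- the inner counting loop of A over the first m columns of a row
lemma pv_count_take (row : List Int) : ∀ (m : Nat), m ≤ row.length →
    pvCountA row m
      = ((row.take m).countP (fun x => decide (x = 0)), (row.take m).countP (fun x => decide (x ≠ 0)))
  | 0, _ => by simp [pvCountA]
  | m + 1, h => by
    have hm : m < row.length := by omega
    unfold pvCountA
    rw [List.range_succ, List.foldl_append]
    have ih := pv_count_take row m (by omega)
    unfold pvCountA at ih
    rw [ih]
    have hget : PySem.List.pyGet? row (m : Int) = some row[m] := by
      rw [PySem.List.pyGet?_natCast]; exact List.getElem?_eq_getElem hm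
    rw [List.take_add_one, List.getElem?_eq_getElem hm]
    simp only [List.foldl_cons, List.foldl_nil, hget, Option.getD_some, Option.toList_some,
      List.countP_append, List.countP_cons, List.countP_nil]
    by_cases hz : row[m] = 0 <;> simp [hz]

-- A's flag/index fold = length and last element of the filtered hub list
lemma pv_fold_flag {P : Nat → Prop} [DecidablePred P] :
    ∀ (l : List Nat) (acc : Nat × Int),
    l.foldl (fun fi i => if P i then (fi.1 + 1, (i : Int)) else fi) acc
      = (acc.1 + (l.filter (fun i => decide (P i))).length,
         ((l.filter (fun i => decide (P i))).map (fun (i : Nat) => (i : Int))).getLastD acc.2)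
  | [], acc => by simp
  | x :: xs, acc => by
    by_cases hp : P x
    · rw [List.foldl_cons, if_pos hp, pv_fold_flag xs (acc.1 + 1, (x : Int)),
        List.filter_cons_of_pos (by simp [hp]), List.map_cons, List.getLastD_cons]
      exact Prod.ext (by simp; omega) rfl
    · rw [List.foldl_cons, if_neg hp, pv_fold_flag xs acc,
        List.filter_cons_of_neg (by simp [hp])]

-- the multiset characterisation behind B: the degree list is a permutation of [3,…,3,n-1]
-- iff there is exactly one hub (degree n-1) and every other degree is 3
lemma pv_perm_char (n : Nat) (hn : n ≠ 4) (d : Nat → Nat) :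
    ((List.range n).map (fun i => (d i : Int))).Perm
      (List.replicate (n - 1) (3 : Int) ++ [(n : Int) - 1])
    ↔ ((List.countP (fun i => decide (d i + 1 = n)) (List.range n)) = 1 ∧
       ∀ i < n, d i + 1 ≠ n → d i = 3) := by
  have hcnt : ∀ a : Int, List.count a ((List.range n).map fun i => (d i : Int))
      = List.countP (fun i => decide ((d i : Int) = a)) (List.range n) := by
    intro a
    rw [List.count_eq_countP, List.countP_map]
    refine List.countP_congr ?_
    intro x _
    simp [Function.comp]
  have htgt : ∀ a : Int, List.count a (List.replicate (n - 1) (3 : Int) ++ [(n : Int) - 1])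
      = (if a = 3 then n - 1 else 0) + (if a = (n : Int) - 1 then 1 else 0) := by
    intro a
    rw [List.count_append, List.count_replicate, List.count_cons, List.count_nil]
    simp only [beq_iff_eq]
    split_ifs <;> omega
  have hhub : ∀ i, (decide (d i + 1 = n) = true ↔ decide ((d i : Int) = (n : Int) - 1) = true) := by
    intro i; simp only [decide_eq_true_eq]; omega
  constructor
  · intro hp
    have hc := fun a => hp.count_eq a
    constructor
    · have h1 := hc ((n : Int) - 1)
      rw [hcnt, htgt] at h1
      rw [if_neg (by omega), if_pos rfl] at h1
      rw [List.countP_congr (fun x _ => hhub x)]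
      omega
    · intro i hi hne
      have hmem : (d i : Int) ∈ (List.range n).map (fun i => (d i : Int)) :=
        List.mem_map.mpr ⟨i, List.mem_range.mpr hi, rfl⟩
      have := hp.mem_iff.mp hmem
      rcases List.mem_append.mp this with h | h
      · have := List.eq_of_mem_replicate h; omega
      · have : (d i : Int) = (n : Int) - 1 := by simpa using h
        omega
  · rintro ⟨h1, h2⟩
    rw [List.perm_iff_count]
    intro a
    rw [hcnt, htgt]
    by_cases ha3 : a = 3
    · subst ha3
      rw [if_pos rfl, if_neg (by omega)]
      -- countP (d i = 3) = countP (¬ hub)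
      have hcg : List.countP (fun i => decide ((d i : Int) = 3)) (List.range n)
          = List.countP (fun i => decide ¬(d i + 1 = n)) (List.range n) := by
        refine List.countP_congr ?_
        intro i hi
        have hi' := List.mem_range.mp hi
        simp only [decide_eq_true_eq]
        constructor
        · intro h3 hhb; omega
        · intro hnh; exact_mod_cast h2 i hi' hnh
      have hsplit2 : (List.range n).length
          = List.countP (fun i => decide (d i + 1 = n)) (List.range n)
            + List.countP (fun i => decide ¬(d i + 1 = n)) (List.range n) := by
        rw [List.length_eq_countP_add_countP (fun i => decide (d i + 1 = n))]
        congr 1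
        refine List.countP_congr ?_
        intro x _
        by_cases h : d x + 1 = n <;> simp [h]
      rw [List.length_range] at hsplit2
      rw [hcg]
      omega
    · rw [if_neg ha3]
      by_cases han : a = (n : Int) - 1
      · subst han
        rw [if_pos rfl, ← List.countP_congr (fun x (_ : x ∈ List.range n) => hhub x)]
        omega
      · rw [if_neg han]
        simp only [Nat.zero_add]
        rw [List.countP_eq_zero.mpr]
        intro i hi
        have hi' := List.mem_range.mp hi
        simp only [decide_eq_true_eq]
        intro hia
        by_cases hhb : d i + 1 = n
        · apply han; omega
        · have := h2 i hi' hhb; apply ha3; omega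

-- ===== VERDICT (by name: the statement is the Claim_ definition above) =====
theorem isWheel_spec : Claim_equal_isWheel := by
  intro adj _ hpre
  unfold Spec_isWheel
  by_cases h4 : adj.length = 4
  · simp [isWheel, isWheel_alt, h4, pvWheel4]
  · by_cases hnil : adj = []
    · subst hnil; decide
    · have hrow2 : ∀ i : Nat, (PySem.List.pyGet? adj (i : Int)).getD [] = adj.getD i [] := by
        intro i; simp [PySem.List.pyGet?_natCast, List.getD_eq_getElem?_getD]
      rcases hpre with h | hsq | hearly
      · exact absurd h h4
      · -- square case
        have hpos : 0 < adj.length := List.length_pos_of_ne_nil hnil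
        have hm : (adj.headD []).length = adj.length := by
          cases adj with
          | nil => exact absurd rfl hnil
          | cons a t => exact hsq a List.mem_cons_self
        have hlen : ∀ i, i < adj.length → (adj.getD i []).length = adj.length := by
          intro i hi
          have hg : adj.getD i [] = adj[i] := by
            rw [List.getD_eq_getElem?_getD, List.getElem?_eq_getElem hi]; rfl
          rw [hg]; exact hsq _ (List.getElem_mem hi)
        set d : Nat → Nat := fun i => (adj.getD i []).countP (fun x => decide (x ≠ 0)) with hd
        have hdle : ∀ i, i < adj.length → d i ≤ adj.length := by
          intro i hi; rw [hd, ← hlen i hi]; exact List.countP_le_length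
        have hcnt : ∀ i, i < adj.length →
            pvCountA (adj.getD i []) adj.length = (adj.length - d i, d i) := by
          intro i hi
          have hrl : (adj.getD i []).length = adj.length := hlen i hi
          have h1 := pv_count_take (adj.getD i []) (adj.getD i []).length le_rfl
          rw [List.take_length, hrl] at h1
          rw [h1]
          have hsum := List.length_eq_countP_add_countP (p := fun x : Int => decide (x = 0))
            (l := adj.getD i [])
          have hfun : (fun a : Int => decide ¬(decide (a = 0) = true)) = (fun x : Int => decide (x ≠ 0)) := by
            funext a; simp
          rw [hrl, hfun] at hsum
          refine Prod.ext ?_ rfl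
          simp only [hd]
          omega
        -- B's degree list is the list of d i, as integers
        have hL : adj.map (fun row => (row.length : Int) - (PySem.List.count row (0 : Int) : Int))
            = (List.range adj.length).map (fun i => (d i : Int)) := by
          refine List.ext_getElem (by simp) ?_
          intro k hk1 hk2
          simp only [List.getElem_map, List.getElem_range]
          have hkn : k < adj.length := by simpa using hk2
          have hg : adj.getD k [] = adj[k]'hkn := by
            rw [List.getD_eq_getElem?_getD, List.getElem?_eq_getElem hkn]; rfl
          rw [PySem.List.count_eq, List.count_eq_countP]
          have hsum := List.length_eq_countP_add_countP (p := fun x : Int => decide (x ≠ 0))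
            (l := adj[k]'hkn)
          have e1 : List.countP (fun x : Int => x == 0) (adj[k]'hkn)
              = List.countP (fun a : Int => decide ¬(decide (a ≠ 0) = true)) (adj[k]'hkn) := by
            refine List.countP_congr ?_
            intro x _
            simp
          simp only [hd, hg]
          omega
        simp only [isWheel, isWheel_alt, if_neg h4, pvRowA, hrow2, hm, hL]
        by_cases hany : ((List.range adj.length).any fun i =>
            decide ((PySem.List.pyGet? (adj.getD i []) (i : Int)).getD 1 ≠ 0)) = true
        · rw [if_pos hany, if_pos hany]
        · -- clean diagonal: A's hub search + corner scan vs B's sorted-profile test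
          have hdiag0 : ∀ i, i < adj.length → d i + 1 ≤ adj.length := by
            intro i hi
            have hne : d i ≠ adj.length := by
              intro hdn
              have hall := (List.countP_eq_length (l := adj.getD i [])
                (p := fun x : Int => decide (x ≠ 0))).mp (by rw [hlen i hi]; exact hdn)
              apply hany
              refine List.any_eq_true.mpr ⟨i, List.mem_range.mpr hi, ?_⟩
              rw [PySem.List.pyGet?_natCast, List.getElem?_eq_getElem (by rw [hlen i hi]; exact hi)]
              simp only [Option.getD_some, decide_eq_true_eq, ne_eq]
              have hmem : (adj.getD i [])[i]'(by rw [hlen i hi]; exact hi) ∈ adj.getD i [] :=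
                List.getElem_mem _
              have := hall _ hmem
              simpa using this
            have := hdle i hi
            omega
          rw [if_neg hany, if_neg hany]
          rw [pv_fold_flag (P := fun i => (pvCountA (adj.getD i []) adj.length).1 = 1 ∧
                ((pvCountA (adj.getD i []) adj.length).2 : Int) = (adj.length : Int) - 1)
              (List.range adj.length) ((0 : Nat), (-1 : Int))]
          -- the hub predicate, pointwise
          have hPd : ∀ i ∈ List.range adj.length,
              (decide ((pvCountA (adj.getD i []) adj.length).1 = 1 ∧
                ((pvCountA (adj.getD i []) adj.length).2 : Int) = (adj.length : Int) - 1))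
              = decide (d i + 1 = adj.length) := by
            intro i hi
            have hi' := List.mem_range.mp hi
            rw [hcnt i hi']
            have := hdle i hi'
            simp only [decide_eq_decide]
            omega
          rw [List.filter_congr hPd]
          rw [Bool.eq_iff_iff]
          have hchar := pv_perm_char adj.length h4 d
          have hFc : List.countP (fun i => decide (d i + 1 = adj.length)) (List.range adj.length)
              = ((List.range adj.length).filter (fun i => decide (d i + 1 = adj.length))).length :=
            List.countP_eq_length_filter
          rw [hFc] at hchar
          by_cases hpw : List.Pairwise (fun a b : Int => a ≤ b)
              (List.replicate (adj.length - 1) (3 : Int) ++ [(adj.length : Int) - 1])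
          · -- target sorted: B true ↔ perm ↔ characterisation
            have hBiff : (PySem.List.sorted ((List.range adj.length).map (fun i => (d i : Int))) (fun x => x) false
                  = List.replicate (adj.length - 1) (3 : Int) ++ [(adj.length : Int) - 1])
                ↔ ((List.range adj.length).map (fun i => (d i : Int))).Perm
                    (List.replicate (adj.length - 1) (3 : Int) ++ [(adj.length : Int) - 1]) := by
              constructor
              · intro he
                have := PySem.List.sorted_perm ((List.range adj.length).map (fun i => (d i : Int))) (fun x => x) false
                rw [he] at this
                exact this.symm
              · intro hp
                exact PySem.List.sorted_id_eq_of_perm_of_pairwise _ _ hp.symm hpw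
            simp only [decide_eq_true_eq]
            rw [hBiff, hchar]
            -- A's branch structure ↔ (exactly one hub ∧ corners)
            generalize hFg : (List.range adj.length).filter (fun i => decide (d i + 1 = adj.length)) = F
            have hFmem : ∀ x, x ∈ F ↔ (x < adj.length ∧ d x + 1 = adj.length) := by
              intro x
              rw [← hFg, List.mem_filter, List.mem_range]
              simp
            match F, hFmem with
            | [], hFm =>
              rw [if_pos (by simp)]
              simp
            | h0 :: h1 :: t, hFm =>
              rw [if_pos (by left; simp only [List.length_cons]; omega)]
              refine iff_of_false (by simp) ?_
              rintro ⟨h, -⟩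
              simp only [List.length_cons] at h
              omega
            | [h0], hFm =>
              simp only [List.length_cons, List.length_nil, List.map_cons, List.map_nil,
                List.getLastD_cons, List.getLastD_nil]
              rw [if_neg (by omega)]
              have hh0 := (hFm h0).mp List.mem_cons_self
              constructor
              · intro hall
                refine ⟨by simp, ?_⟩
                intro i hi hne
                have := List.all_eq_true.mp hall i (List.mem_range.mpr hi)
                by_cases hih : (i : Int) = (h0 : Int)
                · exfalso; apply hne
                  have : i = h0 := by exact_mod_cast hih
                  rw [this]; exact hh0.2
                · rw [if_neg hih] at this
                  have h3 : (pvCountA (adj.getD i []) adj.length).2 = 3 := by simpa using this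
                  rw [hcnt i hi] at h3
                  exact h3
              · rintro ⟨-, hcorners⟩
                refine List.all_eq_true.mpr ?_
                intro i hi
                have hi' := List.mem_range.mp hi
                by_cases hih : (i : Int) = (h0 : Int)
                · rw [if_pos hih]
                · rw [if_neg hih]
                  have hne : d i + 1 ≠ adj.length := by
                    intro hhub
                    have hmemF : i ∈ [h0] := (hFm i).mpr ⟨hi', hhub⟩
                    have : i = h0 := by simpa using hmemF
                    exact hih (by rw [this])
                  have := hcorners i hi' hne
                  rw [hcnt i hi']
                  simpa using this
          · -- target not ascending (adj.length = 2 or 3): both sides are False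
            have hn23 : adj.length = 2 ∨ adj.length = 3 := by
              by_contra hcon
              apply hpw
              rcases Nat.eq_zero_or_pos adj.length with h0 | h0
              · omega
              · rcases Nat.lt_or_ge adj.length 2 with h1 | h1
                · have : adj.length = 1 := by omega
                  rw [this]; simp
                · have h5 : 5 ≤ adj.length := by omega
                  refine List.pairwise_append.mpr ⟨by simp, by simp, ?_⟩
                  intro a ha b hb
                  have ha' := List.eq_of_mem_replicate ha
                  have hb' : b = (adj.length : Int) - 1 := by simpa using hb
                  subst ha' hb'
                  omega
            refine iff_of_false ?_ ?_
            · -- A would need a corner of degree 3, but every degree is < adj.length ≤ 3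
              intro hA
              set F := (List.range adj.length).filter (fun i => decide (d i + 1 = adj.length)) with hF
              by_cases hfl : 0 + F.length > 1 ∨ 0 + F.length = 0
              · rw [if_pos hfl] at hA; exact Bool.false_ne_true hA
              · rw [if_neg hfl] at hA
                have hF1 : F.length = 1 := by omega
                obtain ⟨h0, hFe⟩ := List.length_eq_one_iff.mp hF1
                have hh0 : h0 < adj.length ∧ d h0 + 1 = adj.length := by
                  have : h0 ∈ F := by rw [hFe]; exact List.mem_cons_self
                  rw [hF, List.mem_filter, List.mem_range] at this
                  simpa using this
                obtain ⟨i, hi, hih⟩ : ∃ i, i < adj.length ∧ i ≠ h0 := by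
                  by_cases h00 : h0 = 0
                  · exact ⟨1, by omega, by omega⟩
                  · exact ⟨0, by omega, by omega⟩
                have hline := List.all_eq_true.mp hA i (List.mem_range.mpr hi)
                have hgl : ((F.map (fun i : Nat => (i : Int))).getLastD (-1)) = (h0 : Int) := by
                  rw [hFe]; rfl
                rw [hgl, if_neg (by show ¬(i : Int) = (h0 : Int); exact_mod_cast hih)] at hline
                have h3 : (pvCountA (adj.getD i []) adj.length).2 = 3 := by simpa using hline
                rw [hcnt i hi] at h3
                have := hdiag0 i hi
                omega
            · -- B: a sorted list cannot equal the non-ascending target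
              intro hB
              have hs := PySem.List.sorted_pairwise
                ((List.range adj.length).map (fun i => (d i : Int))) (fun x : Int => x)
              rw [decide_eq_true_iff.mp hB] at hs
              exact hpw hs
      · -- a nonzero diagonal entry is hit first: both scans return False
        obtain ⟨k, hk, hkl, hknz, -⟩ := hearly
        have hknz' : (adj.getD k [])[k]'hkl ≠ 0 := by
          rw [List.getD_eq_getElem?_getD, List.getElem?_eq_getElem hkl] at hknz
          simpa using hknz
        simp only [isWheel, isWheel_alt, if_neg h4, pvRowA, hrow2]
        have hAany : ((List.range adj.length).any fun i =>
            decide ((PySem.List.pyGet? (adj.getD i []) (i : Int)).getD 1 ≠ 0)) = true := by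
          refine List.any_eq_true.mpr ⟨k, List.mem_range.mpr hk, ?_⟩
          rw [PySem.List.pyGet?_natCast, List.getElem?_eq_getElem hkl]
          simpa using hknz'
        rw [if_pos hAany, if_pos hAany]
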